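-- pv_equiv track=rewrite | github.com/KarlenS/AoC25 | day4.py | solve_diagram
-- ===== SOURCE A (Python) =====
-- from typing import List
-- import copy
--
-- def is_accessible(subdiagram: List[List]):
--
--     n_rolls = subdiagram.count('@')
--
--     if n_rolls - 1 < 4:
--         return True
--     else:
--         return False
--
-- def solve_diagram(diagram: List[List], mark = 'x') -> List:
--
--     ref_diagram = copy.deepcopy(diagram)
--
--     n_rows, n_cols = len(diagram),  len(diagram[0])
--
--     n_accessible = 0
--
--     for i, row in enumerate(ref_diagram):
--         for j, col in enumerate(row):
--             row_start = 0 if i == 0 else i-1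
--             col_start = 0 if j == 0 else j-1
--             if col == '@':
--                 subdiagram = [elem for line in ref_diagram[row_start:i+2] for elem in line[col_start:j+2]]
--                 if is_accessible(subdiagram):
--                     n_accessible+=1
--                     diagram[i][j] = mark
--
--     return diagram, n_accessible
-- ===== SOURCE B (Python) =====
-- # B: per-row prefix-sum table over '@' marks; each cell's 3x3 window count is read
-- # from the table by O(1) lookups per row instead of building a 9-cell sublist.
-- # Like A, mutates `diagram` in place.
-- def solve_diagram(diagram, mark='x'):
--     pref = []
--     for row in diagram:
--         p = [0]
--         c = 0
--         for cell in row: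
--             c += 1 if cell == '@' else 0
--             p.append(c)
--         pref.append(p)
--
--     n_accessible = 0
--     for i, p in enumerate(pref):
--         lo_r = 0 if i == 0 else i - 1
--         for j in range(len(p) - 1):
--             if p[j + 1] - p[j] == 1:  # original cell was '@'
--                 lo_c = 0 if j == 0 else j - 1
--                 cnt = 0
--                 for q in pref[lo_r:i + 2]:
--                     m = len(q) - 1
--                     cnt += q[min(j + 2, m)] - q[min(lo_c, m)]
--                 if cnt <= 4:
--                     n_accessible += 1
--                     diagram[i][j] = mark
--     return diagram, n_accessible
-- ===== Notes on version B (the rewrite author's own statement) =====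
-- stated objective: alternative
-- what changed: B replaces A's deepcopy plus per-cell 9-element sublist construction with a per-row prefix-sum table of '@' counts, reading each 3x3 window count via two table lookups per touched row.
import Mathlib
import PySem

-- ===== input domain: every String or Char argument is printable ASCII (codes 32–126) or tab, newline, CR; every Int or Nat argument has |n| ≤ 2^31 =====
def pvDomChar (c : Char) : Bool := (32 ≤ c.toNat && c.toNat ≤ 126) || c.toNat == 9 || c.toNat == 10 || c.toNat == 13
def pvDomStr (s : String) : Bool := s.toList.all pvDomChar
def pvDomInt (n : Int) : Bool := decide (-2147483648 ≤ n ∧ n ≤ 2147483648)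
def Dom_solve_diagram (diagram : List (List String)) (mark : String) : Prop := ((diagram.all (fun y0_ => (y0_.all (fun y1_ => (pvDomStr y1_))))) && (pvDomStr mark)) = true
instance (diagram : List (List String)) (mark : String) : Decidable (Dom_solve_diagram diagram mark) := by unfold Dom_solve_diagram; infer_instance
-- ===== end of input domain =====

-- B marks cells via a per-row prefix-sum table of '@' counts instead of A's deepcopy +
-- per-cell 9-element sublist; both mutate `diagram` in place, the theorem is about the return value.

-- ===== PORT A =====

-- diagram[i][j] = mark  (indices produced by enumerate: nonnegative and in range, so exact)
def setCell (xss : List (List String)) (i j : Int) (m : String) : List (List String) :=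
  xss.set i.toNat ((xss.getD i.toNat []).set j.toNat m)

def is_accessible (subdiagram : List String) : Bool :=
  let n_rolls : Int := subdiagram.count "@"
  if n_rolls - 1 < 4 then true else false

def solve_diagram (diagram : List (List String)) (mark : String) : List (List String) × Int :=
  let ref_diagram := diagram        -- copy.deepcopy: identity on immutable values
  -- n_rows, n_cols = len(diagram), len(diagram[0]): raises IndexError on []; Pre_ excludes it; both unused
  (PySem.List.enumerate ref_diagram 0).foldl (fun st ir =>
    let i := ir.1
    let row := ir.2
    (PySem.List.enumerate row 0).foldl (fun st jc =>
      let j := jc.1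
      let col := jc.2
      let row_start : Int := if i = 0 then 0 else i - 1
      let col_start : Int := if j = 0 then 0 else j - 1
      if col == "@" then
        let subdiagram := (PySem.List.slice ref_diagram (some row_start) (some (i + 2))).flatMap
          (fun line => PySem.List.slice line (some col_start) (some (j + 2)))
        if is_accessible subdiagram then (setCell st.1 i j mark, st.2 + 1) else st
      else st) st) (diagram, 0)

-- ===== PORT B =====

def prefRow (row : List String) : List Int :=
  ((row.foldl (fun (st : List Int × Int) cell =>
      let c := st.2 + (if cell == "@" then 1 else 0)
      (st.1 ++ [c], c)) ([0], 0))).1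

def solve_diagram_alt (diagram : List (List String)) (mark : String) : List (List String) × Int :=
  let pref := diagram.foldl (fun acc row => acc ++ [prefRow row]) []
  (PySem.List.enumerate pref 0).foldl (fun st ip =>
    let i := ip.1
    let p := ip.2
    let lo_r : Int := if i = 0 then 0 else i - 1
    (PySem.List.pyRange 0 ((p.length : Int) - 1) 1).foldl (fun st j =>
      if PySem.List.pyGetD p (j + 1) 0 - PySem.List.pyGetD p j 0 == 1 then
        let lo_c : Int := if j = 0 then 0 else j - 1
        let cnt := (PySem.List.slice pref (some lo_r) (some (i + 2))).foldl (fun c q =>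
          let m : Int := (q.length : Int) - 1
          c + (PySem.List.pyGetD q (min (j + 2) m) 0 - PySem.List.pyGetD q (min lo_c m) 0)) 0
        if cnt ≤ 4 then (setCell st.1 i j mark, st.2 + 1) else st
      else st) st) (diagram, 0)

-- ===== PRECONDITION & SPEC =====
-- A evaluates len(diagram[0]) first, so it raises IndexError on the empty diagram; Pre_ excludes exactly that (B returns ([], 0) there).
def Pre_solve_diagram (diagram : List (List String)) (mark : String) : Prop := diagram ≠ []
instance (diagram : List (List String)) (mark : String) : Decidable (Pre_solve_diagram diagram mark) := by unfold Pre_solve_diagram; infer_instance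
def pvWitness_solve_diagram : List (List String) × String := ([["@", "."], [".", "@"]], "x")

def Spec_solve_diagram (diagram : List (List String)) (mark : String) (out : List (List String) × Int) : Prop := out = solve_diagram_alt diagram mark
instance (diagram : List (List String)) (mark : String) (out : List (List String) × Int) : Decidable (Spec_solve_diagram diagram mark out) := by unfold Spec_solve_diagram; infer_instance

-- ===== CLAIM (what is proved, stated in full; the proofs are below) =====
def Claim_equal_solve_diagram : Prop := ∀ (diagram : List (List String)) (mark : String), Dom_solve_diagram diagram mark → Pre_solve_diagram diagram mark → Spec_solve_diagram diagram mark (solve_diagram diagram mark)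

-- ===== LEMMAS AND PROOFS =====

lemma prefRow_foldl (row : List String) (p : List Int) (c : Int) :
    row.foldl (fun (st : List Int × Int) cell =>
      let cc := st.2 + (if cell == "@" then 1 else 0)
      (st.1 ++ [cc], cc)) (p, c)
    = (p ++ (List.range row.length).map (fun k => c + ((row.take (k+1)).count "@" : Int)),
       c + (row.count "@" : Int)) := by
  induction row generalizing p c with
  | nil => simp
  | cons x xs ih =>
    simp only [List.foldl_cons]
    rw [ih]
    refine Prod.ext ?_ ?_
    · simp only [List.length_cons, List.range_succ_eq_map, List.map_cons, List.map_map,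
        List.append_assoc, List.singleton_append]
      congr 1
      congr 1
      · by_cases hx : x == "@" <;> simp [hx, List.count_cons]
      · refine List.map_congr_left (fun k _ => ?_)
        simp only [Function.comp_apply, List.take_succ_cons, List.count_cons]
        by_cases hx : x == "@" <;> push_cast [hx] <;> ring
    · simp only [List.count_cons]
      by_cases hx : x == "@" <;> push_cast [hx] <;> ring

lemma prefRow_eq (row : List String) :
    prefRow row = (List.range (row.length + 1)).map (fun k => ((row.take k).count "@" : Int)) := by
  unfold prefRow
  rw [prefRow_foldl]
  simp [List.range_succ_eq_map, List.map_map, Function.comp]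

lemma length_prefRow (row : List String) : (prefRow row).length = row.length + 1 := by
  simp [prefRow_eq]

lemma prefRow_get (row : List String) (k : Int) (h0 : 0 ≤ k) (h1 : k ≤ (row.length : Int)) :
    PySem.List.pyGetD (prefRow row) k 0 = ((row.take k.toNat).count "@" : Int) := by
  obtain ⟨n, rfl⟩ : ∃ n : Nat, k = (n : Int) := ⟨k.toNat, (Int.toNat_of_nonneg h0).symm⟩
  rw [PySem.List.pyGetD_natCast, prefRow_eq, PySem.List.getD_map_range _ _ _ _ (by omega)]
  simp

lemma take_min_count (l : List String) (x : Nat) :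
    (l.take (min x l.length)).count "@" = (l.take x).count "@" := by
  rcases le_total x l.length with h | h
  · rw [min_eq_left h]
  · rw [min_eq_right h, List.take_of_length_le h, List.take_length]

lemma count_drop_take (l : List String) (a b : Nat) (hab : a ≤ b) :
    (((l.drop a).take (b - a)).count "@" : Int)
    = ((l.take (min b l.length)).count "@" : Int) - ((l.take (min a l.length)).count "@" : Int) := by
  have hsplit : l.take b = l.take a ++ (l.drop a).take (b - a) := by
    rw [← List.take_add, Nat.add_sub_cancel' hab]
  rw [take_min_count, take_min_count, hsplit, List.count_append]
  push_cast
  ring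

lemma cell_test (row : List String) (j : Int) (h0 : 0 ≤ j) (h1 : j < (row.length : Int)) :
    (PySem.List.pyGetD (prefRow row) (j + 1) 0 - PySem.List.pyGetD (prefRow row) j 0 == 1)
    = (PySem.List.pyGetD row j "" == "@") := by
  obtain ⟨n, rfl⟩ : ∃ n : Nat, j = (n : Int) := ⟨j.toNat, (Int.toNat_of_nonneg h0).symm⟩
  have hn : n < row.length := by exact_mod_cast h1
  have h1' : ((n : Int) + 1) = ((n + 1 : Nat) : Int) := by push_cast; ring
  rw [h1', prefRow_get _ _ (by positivity) (by exact_mod_cast hn),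
      prefRow_get _ _ (by positivity) (by exact_mod_cast hn.le), PySem.List.pyGetD_natCast]
  simp only [Int.toNat_natCast, List.take_add_one, List.count_append]
  have hget : row[n]? = some row[n] := List.getElem?_eq_getElem hn
  have hgetD : row.getD n "" = row[n] := List.getD_eq_getElem row "" hn
  rw [hget, hgetD]
  by_cases hx : row[n] == "@" <;> simp [hx, List.count_cons]

lemma slice_map {α β : Type} (f : α → β) (xs : List α) (a b : Int) (h0 : 0 ≤ a) (h1 : 0 ≤ b) :
    PySem.List.slice (xs.map f) (some a) (some b) = (PySem.List.slice xs (some a) (some b)).map f := by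
  rw [PySem.List.slice_toNat _ h0 h1, PySem.List.slice_toNat _ h0 h1, List.map_take, List.map_drop]

lemma window_count (line : List String) (lo hi : Int) (h0 : 0 ≤ lo) (hlh : lo ≤ hi) :
    PySem.List.pyGetD (prefRow line) (min hi (line.length : Int)) 0
      - PySem.List.pyGetD (prefRow line) (min lo (line.length : Int)) 0
    = ((PySem.List.slice line (some lo) (some hi)).count "@" : Int) := by
  have hhi0 : 0 ≤ hi := le_trans h0 hlh
  rw [PySem.List.slice_toNat _ h0 hhi0,
      prefRow_get _ _ (by omega) (min_le_right _ _),
      prefRow_get _ _ (by omega) (min_le_right _ _)]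
  have e1 : (min hi (line.length : Int)).toNat = min hi.toNat line.length := by omega
  have e2 : (min lo (line.length : Int)).toNat = min lo.toNat line.length := by omega
  rw [e1, e2, count_drop_take line lo.toNat hi.toNat (by omega)]

lemma enumerate_map {α β : Type} (f : α → β) (xs : List α) (s : Int) :
    PySem.List.enumerate (xs.map f) s = (PySem.List.enumerate xs s).map (fun p => (p.1, f p.2)) := by
  induction xs generalizing s with
  | nil => simp [PySem.List.enumerate_nil]
  | cons x xs ih => simp [PySem.List.enumerate_cons, ih]

lemma acc_iff (sub : List String) : (is_accessible sub = true) ↔ ((sub.count "@" : Int) ≤ 4) := by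
  simp only [is_accessible]
  by_cases h : ((sub.count "@" : Int)) - 1 < 4
  · rw [if_pos h]; simp; omega
  · rw [if_neg h]; simp; omega

lemma inner_eq (d : List (List String)) (mark : String) (k : Nat) (hk : k < d.length)
    (st : List (List String) × Int) :
    (PySem.List.enumerate d[k] 0).foldl (fun st jc =>
      let j := jc.1
      let col := jc.2
      let row_start : Int := if ((0:Int) + k) = 0 then 0 else ((0:Int) + k) - 1
      let col_start : Int := if j = 0 then 0 else j - 1
      if col == "@" then
        let subdiagram := (PySem.List.slice d (some row_start) (some (((0:Int) + k) + 2))).flatMap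
          (fun line => PySem.List.slice line (some col_start) (some (j + 2)))
        if is_accessible subdiagram then (setCell st.1 ((0:Int) + k) j mark, st.2 + 1) else st
      else st) st
    = (PySem.List.pyRange 0 (((prefRow d[k]).length : Int) - 1) 1).foldl (fun st j =>
      if PySem.List.pyGetD (prefRow d[k]) (j + 1) 0 - PySem.List.pyGetD (prefRow d[k]) j 0 == 1 then
        let lo_c : Int := if j = 0 then 0 else j - 1
        let cnt := (PySem.List.slice (d.map prefRow) (some (if ((0:Int) + k) = 0 then 0 else ((0:Int) + k) - 1)) (some (((0:Int) + k) + 2))).foldl (fun c q =>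
          let m : Int := (q.length : Int) - 1
          c + (PySem.List.pyGetD q (min (j + 2) m) 0 - PySem.List.pyGetD q (min lo_c m) 0)) 0
        if cnt ≤ 4 then (setCell st.1 ((0:Int) + k) j mark, st.2 + 1) else st
      else st) st := by
  have hlen : ((prefRow d[k]).length : Int) - 1 = (d[k].length : Int) := by
    rw [length_prefRow]; push_cast; ring
  rw [hlen]
  have hlen2 : PySem.List.len d[k] = (d[k].length : Int) := rfl
  rw [PySem.List.enumerate_eq_map_pyRange d[k] "", hlen2, List.foldl_map]
  refine PySem.List.foldl_congr_mem _ _ _ _ (fun st2 j hj => ?_)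
  obtain ⟨hj0, hjlt⟩ := PySem.List.mem_pyRange_one.1 hj
  dsimp only
  rw [cell_test d[k] j hj0 hjlt]
  by_cases hc : (PySem.List.pyGetD d[k] j "" == "@") = true
  · rw [if_pos hc, if_pos hc]
    have hlor0 : (0:Int) ≤ (if 0 + (k:Int) = 0 then 0 else 0 + (k:Int) - 1) := by
      split <;> omega
    have hloc0 : (0:Int) ≤ (if j = 0 then 0 else j - 1) := by split <;> omega
    have hcnt :
        List.foldl
            (fun c q =>
              c +
                (PySem.List.pyGetD q (min (j + 2) ((q.length:Int) - 1)) 0 -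
                  PySem.List.pyGetD q (min (if j = 0 then 0 else j - 1) ((q.length:Int) - 1)) 0))
            0
            (PySem.List.slice (List.map prefRow d) (some (if 0 + (k:Int) = 0 then 0 else 0 + (k:Int) - 1))
              (some (0 + (k:Int) + 2)))
        = (((PySem.List.slice d (some (if 0 + (k:Int) = 0 then 0 else 0 + (k:Int) - 1)) (some (0 + (k:Int) + 2))).flatMap
            (fun line => PySem.List.slice line (some (if j = 0 then 0 else j - 1)) (some (j + 2)))).count "@" : Int) := by
      rw [slice_map prefRow d _ _ hlor0 (by omega), PySem.List.foldl_add, zero_add, List.map_map,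
        List.count_flatMap, Nat.cast_list_sum, List.map_map]
      refine congrArg _ (List.map_congr_left (fun line _ => ?_))
      have hm : ((prefRow line).length : Int) - 1 = (line.length : Int) := by
        rw [length_prefRow]; push_cast; ring
      simp only [Function.comp_apply, hm]
      rw [window_count line _ _ hloc0 (by omega)]
    rw [hcnt]
    exact if_congr (acc_iff _) rfl rfl
  · simp [hc]

theorem ports_eq (d : List (List String)) (mark : String) :
    solve_diagram d mark = solve_diagram_alt d mark := by
  simp only [solve_diagram, solve_diagram_alt]
  rw [PySem.List.foldl_append_singleton_eq_map, List.nil_append, enumerate_map, List.foldl_map]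
  refine PySem.List.foldl_congr_mem _ _ _ _ (fun st ir hmem => ?_)
  obtain ⟨k, hk, rfl⟩ := (PySem.List.mem_enumerate_iff _ _ _).1 hmem
  exact inner_eq d mark k hk st

-- ===== VERDICT (by name: the statement is the Claim_ definition above) =====
theorem solve_diagram_spec : Claim_equal_solve_diagram := by
  intro diagram mark _ _
  unfold Spec_solve_diagram
  exact ports_eq diagram mark
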